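-- pv_equiv track=rewrite | github.com/bollu/w | forces/1606/d.py | base11
-- ===== SOURCE A (Python) =====
-- def base11(n):
-- 	tot = 0
-- 	base = 1
-- 	while n > 0:
-- 		tot = tot + (n % 10) * base
-- 		n = n // 10
-- 		base = base * 11
-- 	return tot
-- ===== SOURCE B (Python) =====
-- def base11(n):
--     if n <= 0:
--         return 0
--     tot = 0
--     for c in str(n):
--         tot = tot * 11 + (ord(c) - ord('0'))
--     return tot
-- ===== Notes on version B (the rewrite author's own statement) =====
-- stated objective: alternative
-- what changed: B renders n with str(n) and Horner-folds its decimal digit characters most-significant-first (tot = tot*11 + digit), replacing A's arithmetic while-loop that peels digits least-significant-first while maintaining a running power of 11.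
import Mathlib
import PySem

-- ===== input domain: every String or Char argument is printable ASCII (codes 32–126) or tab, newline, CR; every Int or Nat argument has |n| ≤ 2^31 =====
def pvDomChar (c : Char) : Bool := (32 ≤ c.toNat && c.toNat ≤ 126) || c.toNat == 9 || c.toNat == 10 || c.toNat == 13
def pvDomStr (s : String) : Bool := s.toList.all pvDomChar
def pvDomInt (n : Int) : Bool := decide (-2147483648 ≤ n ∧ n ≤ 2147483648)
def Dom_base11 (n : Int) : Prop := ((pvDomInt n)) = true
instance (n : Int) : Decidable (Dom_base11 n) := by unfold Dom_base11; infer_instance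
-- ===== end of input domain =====

-- B renders n with str(n) and Horner-folds the digit characters most-significant-first,
-- replacing A's arithmetic loop with a running power of 11 (objective: alternative).

-- ===== PORT A =====
-- A's while loop: state (n, tot, base)
def base11Loop (n tot base : Int) : Int :=
  if h : n > 0 then
    base11Loop (PySem.Int.floordiv n 10) (tot + (PySem.Int.mod n 10) * base) (base * 11)
  else tot
termination_by n.toNat
decreasing_by
  have := PySem.Int.floordiv_eq_ediv_of_pos (a := n) (b := 10) (by omega)
  rw [this]; omega

def base11 (n : Int) : Int := base11Loop n 0 1

-- ===== PORT B =====
-- Source B: 'for c in str(n)' iterates the characters of str(n); str(n) is PySem.Int.toStr n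
-- and (PySem.Int.toStr n).toList = PySem.Int.toChars n (PySem.Int.toList_toStr), so the
-- loop is a foldl over PySem.Int.toChars n; ord(c) - ord('0') is (c.toNat : Int) - 48.
def base11_alt (n : Int) : Int :=
  if n ≤ 0 then 0
  else (PySem.Int.toChars n).foldl (fun tot c => tot * 11 + ((c.toNat : Int) - 48)) 0

-- ===== PRECONDITION & SPEC =====
def Spec_base11 (n : Int) (out : Int) : Prop := out = base11_alt n
instance (n : Int) (out : Int) : Decidable (Spec_base11 n out) := by unfold Spec_base11; infer_instance

-- ===== CLAIM =====
def Claim_equal_base11 : Prop := ∀ (n : Int), Dom_base11 n → Spec_base11 n (base11 n)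

-- ===== LEMMAS AND PROOFS =====

-- the base-11 value of m's decimal digits (common characterisation of both ports)
def pvVal (m : Nat) : Int :=
  if h : m = 0 then 0 else 11 * pvVal (m / 10) + ((m % 10 : Nat) : Int)
termination_by m
decreasing_by exact Nat.div_lt_self (Nat.pos_of_ne_zero h) (by omega)

-- the decimal digit characters of m, most-significant-first (what Nat.toDigits 10 produces)
def pvDigs (m : Nat) : List Char :=
  if h : m < 10 then [Nat.digitChar m]
  else pvDigs (m / 10) ++ [Nat.digitChar (m % 10)]
termination_by m
decreasing_by exact Nat.div_lt_self (by omega) (by omega)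

theorem pvVal_zero : pvVal 0 = 0 := by simp [pvVal]

theorem pvVal_pos (m : Nat) (h : m ≠ 0) :
    pvVal m = 11 * pvVal (m / 10) + ((m % 10 : Nat) : Int) := by
  rw [pvVal, dif_neg h]

theorem pvDigs_lt (m : Nat) (h : m < 10) : pvDigs m = [Nat.digitChar m] := by
  rw [pvDigs, dif_pos h]

theorem pvDigs_ge (m : Nat) (h : ¬ m < 10) :
    pvDigs m = pvDigs (m / 10) ++ [Nat.digitChar (m % 10)] := by
  rw [pvDigs, dif_neg h]

theorem base11Loop_eq (n tot base : Int) : base11Loop n tot base = tot + base * pvVal n.toNat := by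
  fun_induction base11Loop n tot base with
  | case1 n tot base h ih =>
      obtain ⟨m, rfl⟩ : ∃ m : Nat, n = (m : Int) :=
        ⟨n.toNat, (Int.toNat_of_nonneg (le_of_lt h)).symm⟩
      have hf : PySem.Int.floordiv (m : Int) 10 = ((m / 10 : Nat) : Int) := by
        exact_mod_cast PySem.Int.floordiv_natCast m 10
      have hmd : PySem.Int.mod (m : Int) 10 = ((m % 10 : Nat) : Int) := by
        exact_mod_cast PySem.Int.mod_natCast m 10
      rw [hf, hmd] at ih
      rw [hf, hmd, ih, Int.toNat_natCast, Int.toNat_natCast,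
        pvVal_pos m (by omega)]
      ring
  | case2 n tot base h =>
      have hz : n.toNat = 0 := by omega
      rw [hz, pvVal_zero]; ring

theorem pvDigitChar_toNat (d : Nat) (h : d < 10) :
    ((Nat.digitChar d).toNat : Int) - 48 = (d : Int) := by
  interval_cases d <;> decide

theorem toDigitsCore_eq_pvDigs :
    ∀ (fuel m : Nat), m < fuel → ∀ (acc : List Char),
      Nat.toDigitsCore 10 fuel m acc = pvDigs m ++ acc := by
  intro fuel
  induction fuel with
  | zero => intro m hm; omega
  | succ f ih =>
      intro m hm acc
      by_cases h10 : m < 10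
      · have hdiv : m / 10 = 0 := Nat.div_eq_of_lt h10
        simp only [Nat.toDigitsCore, hdiv]
        rw [pvDigs_lt m h10, Nat.mod_eq_of_lt h10]
        rfl
      · have hdiv : m / 10 ≠ 0 := by
          intro h0; exact h10 (Nat.lt_of_div_eq_zero (by omega) h0)
        simp only [Nat.toDigitsCore, if_neg hdiv]
        rw [ih (m / 10) (by
          have := Nat.div_lt_self (show 0 < m by omega) (show 1 < 10 by omega)
          omega)]
        rw [pvDigs_ge m h10]
        simp

theorem horner_pvDigs :
    ∀ (m : Nat) (t : Int),
      (pvDigs m).foldl (fun tot c => tot * 11 + ((c.toNat : Int) - 48)) t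
        = t * 11 ^ (pvDigs m).length + pvVal m := by
  intro m
  fun_induction pvDigs m with
  | case1 m h =>
      intro t
      simp only [List.foldl_cons, List.foldl_nil, List.length_cons, List.length_nil]
      rw [pvDigitChar_toNat m h]
      by_cases h0 : m = 0
      · subst h0; rw [pvVal_zero]; ring
      · rw [pvVal_pos m h0, Nat.div_eq_of_lt h, Nat.mod_eq_of_lt h, pvVal_zero]
        ring
  | case2 m h ih =>
      intro t
      simp only [List.foldl_append, List.foldl_cons, List.foldl_nil,
        List.length_append, List.length_cons, List.length_nil]
      rw [ih, pvDigitChar_toNat (m % 10) (Nat.mod_lt m (by omega))]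
      rw [pvVal_pos m (by omega)]
      ring

-- ===== VERDICT =====
theorem base11_spec : Claim_equal_base11 := by
  intro n _
  unfold Spec_base11 base11 base11_alt
  rw [base11Loop_eq]
  by_cases h : n ≤ 0
  · rw [if_pos h]
    have hz : n.toNat = 0 := by omega
    rw [hz, pvVal_zero]; ring
  · rw [if_neg h]
    have hneg : ¬ n < 0 := by omega
    rw [show PySem.Int.toChars n = Nat.toDigits 10 n.toNat by
      simp [PySem.Int.toChars, hneg]]
    rw [Nat.toDigits, toDigitsCore_eq_pvDigs (n.toNat + 1) n.toNat (by omega) []]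
    rw [List.append_nil, horner_pvDigs]
    ring
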